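-- pv_equiv track=rewrite | github.com/CarloCHEN/pudu_robot | analyzers/context_analyzer.py | generate_capacity_recommendations
-- ===== SOURCE A (Python) =====
-- from typing import Dict, List, Any, Tuple
--
-- def generate_capacity_recommendations(employee_capacity: Dict[str, Any]) -> List[str]:
--     """Generate capacity management recommendations"""
--     recommendations = []
--
--     # Identify overutilized employees
--     overutilized = [emp for emp, data in employee_capacity.items() if data['utilization_rate'] > 100]
--     if overutilized:
--         recommendations.append(f"Redistribute workload for {len(overutilized)} overutilized employees")
--
--     # Identify underutilized employees
--     underutilized = [emp for emp, data in employee_capacity.items() if data['utilization_rate'] < 70]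
--     if underutilized:
--         recommendations.append(f"Increase task allocation for {len(underutilized)} underutilized employees")
--
--     # Cross-training recommendations
--     utilization_variance = max(data['utilization_rate'] for data in employee_capacity.values()) - min(data['utilization_rate'] for data in employee_capacity.values()) if employee_capacity else 0
--     if utilization_variance > 40:
--         recommendations.append("Consider cross-training to improve workload flexibility")
--
--     return recommendations
-- ===== SOURCE B (Python) =====
-- def generate_capacity_recommendations(employee_capacity):
--     """Single pass: accumulate counts and running extrema, then emit messages."""
--     over = 0
--     under = 0
--     max_rate = None
--     min_rate = None
--     for data in employee_capacity.values():
--         r = data['utilization_rate']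
--         if r > 100:
--             over += 1
--         if r < 70:
--             under += 1
--         if max_rate is None or r > max_rate:
--             max_rate = r
--         if min_rate is None or r < min_rate:
--             min_rate = r
--     recommendations = []
--     if over:
--         recommendations.append(f"Redistribute workload for {over} overutilized employees")
--     if under:
--         recommendations.append(f"Increase task allocation for {under} underutilized employees")
--     variance = (max_rate - min_rate) if max_rate is not None else 0
--     if variance > 40:
--         recommendations.append("Consider cross-training to improve workload flexibility")
--     return recommendations
-- ===== Notes on version B (the rewrite author's own statement) =====
-- stated objective: faster
-- what changed: Replaces A's four separate scans (two filter comprehensions plus max and min generator passes) with one loop that accumulates the over/under counts and running max/min, building the same messages afterwards.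
import Mathlib
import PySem

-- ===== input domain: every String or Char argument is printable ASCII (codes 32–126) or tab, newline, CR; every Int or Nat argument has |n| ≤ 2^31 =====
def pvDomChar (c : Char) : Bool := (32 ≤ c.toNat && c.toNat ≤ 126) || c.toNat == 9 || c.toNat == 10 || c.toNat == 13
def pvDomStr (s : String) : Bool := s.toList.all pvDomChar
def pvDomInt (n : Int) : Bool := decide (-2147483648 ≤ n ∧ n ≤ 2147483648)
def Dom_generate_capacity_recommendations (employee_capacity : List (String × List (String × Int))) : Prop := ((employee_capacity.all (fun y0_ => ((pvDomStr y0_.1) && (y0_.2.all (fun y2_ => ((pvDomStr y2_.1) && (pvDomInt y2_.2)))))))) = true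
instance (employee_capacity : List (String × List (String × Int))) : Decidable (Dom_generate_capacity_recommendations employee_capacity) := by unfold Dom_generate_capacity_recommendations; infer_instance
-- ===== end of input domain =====

-- B merges A's four scans (two filters, max, min) into one accumulating loop; same messages, same order.

-- data['utilization_rate'] as a total function; Pre_ guarantees the key is present (else Python raises KeyError)
def pvRate (d : List (String × Int)) : Int :=
  ((PySem.Dict.mk d).get? "utilization_rate").getD 0

-- ===== PORT A =====
def generate_capacity_recommendations (employee_capacity : List (String × List (String × Int))) : List String :=
  let recommendations : List String := []
  let overutilized := (employee_capacity.filter (fun p => pvRate p.2 > 100)).map (·.1)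
  let recommendations := if overutilized ≠ [] then
      recommendations ++ ["Redistribute workload for " ++ PySem.Int.toStr (overutilized.length : Int) ++ " overutilized employees"]
    else recommendations
  let underutilized := (employee_capacity.filter (fun p => pvRate p.2 < 70)).map (·.1)
  let recommendations := if underutilized ≠ [] then
      recommendations ++ ["Increase task allocation for " ++ PySem.Int.toStr (underutilized.length : Int) ++ " underutilized employees"]
    else recommendations
  let utilization_variance : Int := if employee_capacity ≠ [] then
      (PySem.List.max? (employee_capacity.map (fun p => pvRate p.2)) (fun x => x)).getD 0
        - (PySem.List.min? (employee_capacity.map (fun p => pvRate p.2)) (fun x => x)).getD 0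
    else 0
  if utilization_variance > 40 then
    recommendations ++ ["Consider cross-training to improve workload flexibility"]
  else recommendations

-- ===== PORT B =====
def pvStepB (st : Int × Int × Option Int × Option Int) (d : List (String × Int)) :
    Int × Int × Option Int × Option Int :=
  let r := pvRate d
  let over_c := if r > 100 then st.1 + 1 else st.1
  let under_c := if r < 70 then st.2.1 + 1 else st.2.1
  let max_rate := match st.2.2.1 with
    | none => some r
    | some m => if r > m then some r else some m
  let min_rate := match st.2.2.2 with
    | none => some r
    | some m => if r < m then some r else some m
  (over_c, under_c, max_rate, min_rate)

def generate_capacity_recommendations_alt (employee_capacity : List (String × List (String × Int))) : List String :=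
  let st := employee_capacity.foldl (fun st p => pvStepB st p.2) (0, 0, none, none)
  let recommendations : List String := []
  let recommendations := if st.1 ≠ 0 then
      recommendations ++ ["Redistribute workload for " ++ PySem.Int.toStr st.1 ++ " overutilized employees"]
    else recommendations
  let recommendations := if st.2.1 ≠ 0 then
      recommendations ++ ["Increase task allocation for " ++ PySem.Int.toStr st.2.1 ++ " underutilized employees"]
    else recommendations
  let variance : Int := match st.2.2.1, st.2.2.2 with
    | some a, some b => a - b
    | _, _ => 0
  if variance > 40 then
    recommendations ++ ["Consider cross-training to improve workload flexibility"]
  else recommendations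

-- ===== PRECONDITION & SPEC =====
-- Pre_ excludes exactly the inputs where some employee record lacks the 'utilization_rate'
-- key, on which the Python A raises KeyError.
def Pre_generate_capacity_recommendations (employee_capacity : List (String × List (String × Int))) : Prop :=
  (employee_capacity.all (fun p => ((PySem.Dict.mk p.2).get? "utilization_rate").isSome)) = true
instance (employee_capacity : List (String × List (String × Int))) : Decidable (Pre_generate_capacity_recommendations employee_capacity) := by unfold Pre_generate_capacity_recommendations; infer_instance
def pvWitness_generate_capacity_recommendations : (List (String × List (String × Int))) :=
  [("alice", [("utilization_rate", 120)]), ("bob", [("utilization_rate", 50)])]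

def Spec_generate_capacity_recommendations (employee_capacity : List (String × List (String × Int))) (out : List String) : Prop := out = generate_capacity_recommendations_alt employee_capacity
instance (employee_capacity : List (String × List (String × Int))) (out : List String) : Decidable (Spec_generate_capacity_recommendations employee_capacity out) := by unfold Spec_generate_capacity_recommendations; infer_instance

-- ===== CLAIM (what is proved, stated in full; the proofs are below) =====
def Claim_equal_generate_capacity_recommendations : Prop := ∀ (employee_capacity : List (String × List (String × Int))), Dom_generate_capacity_recommendations employee_capacity → Pre_generate_capacity_recommendations employee_capacity → Spec_generate_capacity_recommendations employee_capacity (generate_capacity_recommendations employee_capacity)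

-- ===== LEMMAS AND PROOFS =====

-- common normal form: the recommendation list as a function of the two counts and the variance
def pvRender (o u v : Int) : List String :=
  (if o != 0 then ["Redistribute workload for " ++ PySem.Int.toStr o ++ " overutilized employees"] else [])
  ++ (if u != 0 then ["Increase task allocation for " ++ PySem.Int.toStr u ++ " underutilized employees"] else [])
  ++ (if v > 40 then ["Consider cross-training to improve workload flexibility"] else [])

def pvCntO (ec : List (String × List (String × Int))) : Int :=
  ((ec.filter (fun p => pvRate p.2 > 100)).length : Int)
def pvCntU (ec : List (String × List (String × Int))) : Int :=
  ((ec.filter (fun p => pvRate p.2 < 70)).length : Int)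
def pvVar (ec : List (String × List (String × Int))) : Int :=
  if ec ≠ [] then
    (PySem.List.max? (ec.map (fun p => pvRate p.2)) (fun x => x)).getD 0
      - (PySem.List.min? (ec.map (fun p => pvRate p.2)) (fun x => x)).getD 0
  else 0

-- B's fold, once both extrema are 'some', computes counts and running extrema.
theorem pvFoldB_some (l : List (String × List (String × Int))) :
    ∀ (o u m n : Int),
      l.foldl (fun st p => pvStepB st p.2) (o, u, some m, some n)
      = (o + ((l.filter (fun p => pvRate p.2 > 100)).length : Int),
         u + ((l.filter (fun p => pvRate p.2 < 70)).length : Int),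
         some ((l.map (fun p => pvRate p.2)).foldl max m),
         some ((l.map (fun p => pvRate p.2)).foldl min n)) := by
  induction l with
  | nil => intro o u m n; simp
  | cons p t ih =>
    intro o u m n
    rw [List.foldl_cons]
    have hs : pvStepB (o, u, some m, some n) p.2
        = ((if pvRate p.2 > 100 then o + 1 else o),
           (if pvRate p.2 < 70 then u + 1 else u),
           some (max m (pvRate p.2)), some (min n (pvRate p.2))) := by
      simp only [pvStepB, max_def, min_def]
      split_ifs <;> simp <;> omega
    rw [hs, ih]
    simp only [List.map_cons, List.foldl_cons, List.filter_cons]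
    by_cases h1 : pvRate p.2 > 100 <;> by_cases h2 : pvRate p.2 < 70 <;>
      simp [h1, h2] <;> omega

theorem renderA (ec : List (String × List (String × Int))) :
    generate_capacity_recommendations ec = pvRender (pvCntO ec) (pvCntU ec) (pvVar ec) := by
  unfold generate_capacity_recommendations pvRender pvCntO pvCntU pvVar
  by_cases hO : (ec.filter (fun p => pvRate p.2 > 100)) = [] <;>
    by_cases hU : (ec.filter (fun p => pvRate p.2 < 70)) = [] <;>
      simp [hO, hU, List.length_eq_zero_iff] <;> split_ifs <;> simp

theorem renderB (ec : List (String × List (String × Int))) :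
    generate_capacity_recommendations_alt ec = pvRender (pvCntO ec) (pvCntU ec) (pvVar ec) := by
  cases ec with
  | nil => decide
  | cons p t =>
    unfold generate_capacity_recommendations_alt
    rw [List.foldl_cons]
    have hstep : pvStepB (0, 0, none, none) p.2
        = (if pvRate p.2 > 100 then (1 : Int) else 0,
           if pvRate p.2 < 70 then (1 : Int) else 0,
           some (pvRate p.2), some (pvRate p.2)) := by
      simp [pvStepB]
    rw [hstep, pvFoldB_some]
    have hO : (if pvRate p.2 > 100 then (1 : Int) else 0)
        + ((t.filter (fun p => pvRate p.2 > 100)).length : Int) = pvCntO (p :: t) := by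
      by_cases h : pvRate p.2 > 100 <;> simp [pvCntO, h] <;> omega
    have hU : (if pvRate p.2 < 70 then (1 : Int) else 0)
        + ((t.filter (fun p => pvRate p.2 < 70)).length : Int) = pvCntU (p :: t) := by
      by_cases h : pvRate p.2 < 70 <;> simp [pvCntU, h] <;> omega
    have hV : ((t.map (fun p => pvRate p.2)).foldl max (pvRate p.2))
        - ((t.map (fun p => pvRate p.2)).foldl min (pvRate p.2)) = pvVar (p :: t) := by
      simp [pvVar, PySem.List.max?_id_cons, PySem.List.min?_id_cons]
    simp only [hO, hU, hV, pvRender]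
    split_ifs <;> simp_all

-- ===== VERDICT (by name: the statement is the Claim_ definition above) =====
theorem generate_capacity_recommendations_spec : Claim_equal_generate_capacity_recommendations := by
  intro ec _ _
  unfold Spec_generate_capacity_recommendations
  rw [renderA, renderB]
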